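-- pv_equiv track=rewrite | github.com/The1stBurb/truCPU | imgs/scren.py | byt
-- ===== SOURCE A (Python) =====
-- bitSize=16
--
-- def bin_hex(bin_str):
--     if len(bin_str)<bitSize:bin_str=bin_str+("0"*(bitSize-len(bin_str)))
--     if len(bin_str) != bitSize or any(c not in '01' for c in bin_str):
--         raise ValueError("Input must be a 16-character string of '0's and '1's.")
--     return hex(int(bin_str, 2))[2:].zfill(4)
--
-- def byt(n,lon=False):
--     if n<0:
--         return "0"*bitSize
--     s=""
--     for i in range(bitSize-1,-1,-1):
--         if 2**i<=n:
--             s+="1"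
--             n-=2**i
--         else:
--             s+="0"
--
--     return bin_hex(s)
-- ===== SOURCE B (Python) =====
-- bitSize = 16
--
-- def byt(n, lon=False):
--     if n < 0:
--         return "0" * bitSize
--     v = min(n, (1 << bitSize) - 1)
--     digits = []
--     for _ in range(4):
--         digits.append("0123456789abcdef"[v & 15])
--         v >>= 4
--     return "".join(reversed(digits))
-- ===== Notes on version B (the rewrite author's own statement) =====
-- stated objective: simpler
-- what changed: Replaced the 16-step greedy power-of-two subtraction loop plus binary-string validation/parse/hex round-trip by a clamp to 65535 followed by a 4-step nibble-extraction loop over a hex digit table (the clamp is exactly the value A's greedy loop computes for any n >= 65535).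
import Mathlib
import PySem

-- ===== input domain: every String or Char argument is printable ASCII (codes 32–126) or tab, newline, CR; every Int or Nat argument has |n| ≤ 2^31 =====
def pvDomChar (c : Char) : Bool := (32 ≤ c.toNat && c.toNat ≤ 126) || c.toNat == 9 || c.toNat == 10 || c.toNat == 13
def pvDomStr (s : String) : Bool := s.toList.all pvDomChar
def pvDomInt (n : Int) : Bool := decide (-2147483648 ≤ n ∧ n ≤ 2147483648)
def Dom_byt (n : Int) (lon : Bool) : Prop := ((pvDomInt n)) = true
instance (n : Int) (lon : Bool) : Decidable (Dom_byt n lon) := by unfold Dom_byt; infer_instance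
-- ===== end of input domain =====

-- B replaces A's 16-step greedy bit loop + binary-string parse/hex round-trip by a clamp to
-- 65535 followed by a 4-step nibble-extraction loop over a hex digit table (objective: simpler).

-- ===== PORT A =====
-- A-side model of Python's lowercase hex rendering used by bin_hex (hex(v)[2:] and zfill(4)):
-- digit for 0 ≤ d < 16
def hexDigit (d : Nat) : Char := if d < 10 then Char.ofNat (48 + d) else Char.ofNat (87 + d)

-- hex digits of m, least significant first ([] for 0)
def hexRev : Nat → List Char
  | 0 => []
  | m + 1 => hexDigit ((m + 1) % 16) :: hexRev ((m + 1) / 16)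
  decreasing_by exact Nat.div_lt_self (Nat.succ_pos m) (by norm_num)

-- hex(v)[2:] for v ≥ 0 (Python renders 0 as "0")
def pyHex (m : Nat) : List Char := if m = 0 then ['0'] else (hexRev m).reverse

-- str.zfill(4) on a digit string (no sign handling needed: pyHex never yields a sign)
def zfill4 (l : List Char) : List Char := List.replicate (4 - l.length) '0' ++ l

-- int(bin_str, 2): exact for strings already validated to consist of '0'/'1' only
def parse2 (l : List Char) : Int := l.foldl (fun acc c => acc * 2 + (if c = '1' then 1 else 0)) 0

-- bin_hex; none = the ValueError raise (unreachable from byt, whose strings are 16 chars of 0/1)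
def bin_hex (bin_str : List Char) : Option String :=
  let bin_str := if bin_str.length < 16 then bin_str ++ List.replicate (16 - bin_str.length) '0' else bin_str
  if (bin_str.length != 16) || bin_str.any (fun c => !(c == '0' || c == '1')) then none
  else some (String.mk (zfill4 (pyHex (parse2 bin_str).toNat)))

-- one loop iteration of byt: state (s, n), exponent i (always 15..0, so i.toNat is exact)
def bytStep (st : List Char × Int) (i : Int) : List Char × Int :=
  if (2 : Int) ^ i.toNat ≤ st.2 then (st.1 ++ ['1'], st.2 - 2 ^ i.toNat) else (st.1 ++ ['0'], st.2)

def byt (n : Int) (lon : Bool) : String :=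
  if n < 0 then String.mk (List.replicate 16 '0')
  else
    let r := (PySem.List.pyRange 15 (-1) (-1)).foldl bytStep ([], n)
    (bin_hex r.1).getD ""   -- none is unreachable (proved via the loop invariant below)

-- ===== PORT B =====
-- "0123456789abcdef"[d]
def nib (d : Nat) : Char := "0123456789abcdef".toList.getD d '0'

-- one iteration of B's loop: append table[v & 15], then v >>= 4
-- (exact: v ≥ 0 throughout this loop, so v & 15 = v % 16 and v >> 4 = v / 16 on Nat)
def altStep (st : List Char × Nat) (_ : Int) : List Char × Nat :=
  (st.1 ++ [nib (st.2 % 16)], st.2 / 16)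

def byt_alt (n : Int) (lon : Bool) : String :=
  if n < 0 then String.mk (List.replicate 16 '0')
  else
    let r := (PySem.List.pyRange 0 4 1).foldl altStep ([], (min n 65535).toNat)
    String.mk r.1.reverse

-- ===== PRECONDITION & SPEC =====
def Spec_byt (n : Int) (lon : Bool) (out : String) : Prop := out = byt_alt n lon
instance (n : Int) (lon : Bool) (out : String) : Decidable (Spec_byt n lon out) := by unfold Spec_byt; infer_instance

-- ===== CLAIM =====
def Claim_equal_byt : Prop := ∀ (n : Int) (lon : Bool), Dom_byt n lon → Spec_byt n lon (byt n lon)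

-- ===== LEMMAS AND PROOFS =====

-- exponents [k-1, …, 0]; range(15,-1,-1) is descInts 16 (checked by decide below)
def descInts : Nat → List Int
  | 0 => []
  | k + 1 => (k : Int) :: descInts k

lemma pyRange_eq_descInts : PySem.List.pyRange 15 (-1) (-1) = descInts 16 := by decide

lemma parse2_append_one (s : List Char) : parse2 (s ++ ['1']) = parse2 s * 2 + 1 := by
  simp [parse2, List.foldl_append]

lemma parse2_append_zero (s : List Char) : parse2 (s ++ ['0']) = parse2 s * 2 := by
  simp [parse2, List.foldl_append]

-- loop invariant of A: the greedy loop over bits k-1..0 appends k chars of '0'/'1' whose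
-- binary value is min m (2^k - 1)
lemma loop_spec (k : Nat) : ∀ (s : List Char) (m : Int), 0 ≤ m →
    ((descInts k).foldl bytStep (s, m)).1.length = s.length + k ∧
    (∀ c ∈ ((descInts k).foldl bytStep (s, m)).1, c ∈ s ∨ c = '0' ∨ c = '1') ∧
    parse2 ((descInts k).foldl bytStep (s, m)).1 = parse2 s * 2 ^ k + min m (2 ^ k - 1) := by
  induction k with
  | zero =>
    intro s m hm
    refine ⟨by simp [descInts], fun c hc => Or.inl hc, ?_⟩
    simp [descInts]
    omega
  | succ k ih =>
    intro s m hm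
    have hpow : (0 : Int) < 2 ^ k := by positivity
    have htn : ((k : Int)).toNat = k := Int.toNat_natCast k
    by_cases hle : (2 : Int) ^ k ≤ m
    · have hstep : bytStep (s, m) (k : Int) = (s ++ ['1'], m - 2 ^ k) := by
        simp [bytStep, htn, hle]
      have h := ih (s ++ ['1']) (m - 2 ^ k) (by omega)
      rcases h with ⟨hlen, hmem, hval⟩
      refine ⟨?_, ?_, ?_⟩
      · simp only [descInts, List.foldl_cons, hstep, hlen, List.length_append,
          List.length_cons, List.length_nil]
        omega
      · intro c hc
        simp only [descInts, List.foldl_cons, hstep] at hc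
        rcases hmem c hc with h' | h' | h'
        · rcases List.mem_append.1 h' with h'' | h''
          · exact Or.inl h''
          · right; right; simpa using h''
        · exact Or.inr (Or.inl h')
        · exact Or.inr (Or.inr h')
      · simp only [descInts, List.foldl_cons, hstep]
        rw [hval, parse2_append_one]
        have h2 : (2 : Int) ^ (k + 1) = 2 ^ k * 2 := by ring
        rw [h2]
        have hre : (parse2 s * 2 + 1) * 2 ^ k = parse2 s * (2 ^ k * 2) + 2 ^ k := by ring
        omega
    · have hstep : bytStep (s, m) (k : Int) = (s ++ ['0'], m) := by
        simp [bytStep, htn, hle]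
      have h := ih (s ++ ['0']) m hm
      rcases h with ⟨hlen, hmem, hval⟩
      refine ⟨?_, ?_, ?_⟩
      · simp only [descInts, List.foldl_cons, hstep, hlen, List.length_append,
          List.length_cons, List.length_nil]
        omega
      · intro c hc
        simp only [descInts, List.foldl_cons, hstep] at hc
        rcases hmem c hc with h' | h' | h'
        · rcases List.mem_append.1 h' with h'' | h''
          · exact Or.inl h''
          · right; left; simpa using h''
        · exact Or.inr (Or.inl h')
        · exact Or.inr (Or.inr h')
      · simp only [descInts, List.foldl_cons, hstep]
        rw [hval, parse2_append_zero]
        have h2 : (2 : Int) ^ (k + 1) = 2 ^ k * 2 := by ring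
        rw [h2]
        have hre : parse2 s * 2 * 2 ^ k = parse2 s * (2 ^ k * 2) := by ring
        omega

-- unfolding equation for hexRev on a nonzero argument
lemma hexRev_pos (m : Nat) (h : m ≠ 0) :
    hexRev m = hexDigit (m % 16) :: hexRev (m / 16) := by
  cases m with
  | zero => exact absurd rfl h
  | succ k => rw [hexRev]

lemma nib_eq_hexDigit (d : Nat) (h : d < 16) : nib d = hexDigit d := by
  interval_cases d <;> decide

-- the A-side padded hex string of any m < 65536 is exactly the four nibble digits
lemma zfill4_pyHex (m : Nat) (h : m < 65536) :
    zfill4 (pyHex m) =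
      [hexDigit (m / 4096 % 16), hexDigit (m / 256 % 16),
       hexDigit (m / 16 % 16), hexDigit (m % 16)] := by
  by_cases h0 : m = 0
  · subst h0; decide
  · by_cases h1 : m < 16
    · have e1 : m / 16 = 0 := Nat.div_eq_of_lt h1
      have e2 : m / 256 = 0 := Nat.div_eq_of_lt (by omega)
      have e3 : m / 4096 = 0 := Nat.div_eq_of_lt (by omega)
      rw [pyHex, if_neg h0, hexRev_pos m h0, e1]
      simp [hexRev, zfill4, e2, e3, List.replicate]
      decide
    · by_cases h2 : m < 256
      · have q1 : m / 16 ≠ 0 := by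
          intro e; have := Nat.lt_of_div_eq_zero (by norm_num) e; omega
        have e1 : m / 16 / 16 = 0 := by
          rw [Nat.div_div_eq_div_mul]; exact Nat.div_eq_of_lt (by omega)
        have e2 : m / 256 = 0 := Nat.div_eq_of_lt h2
        have e3 : m / 4096 = 0 := Nat.div_eq_of_lt (by omega)
        rw [pyHex, if_neg h0, hexRev_pos m h0, hexRev_pos _ q1, e1]
        simp [hexRev, zfill4, e2, e3, List.replicate]
        decide
      · by_cases h3 : m < 4096
        · have q1 : m / 16 ≠ 0 := by
            intro e; have := Nat.lt_of_div_eq_zero (by norm_num) e; omega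
          have q2 : m / 16 / 16 ≠ 0 := by
            rw [Nat.div_div_eq_div_mul]
            intro e; have := Nat.lt_of_div_eq_zero (by norm_num) e; omega
          have e1 : m / 16 / 16 / 16 = 0 := by
            rw [Nat.div_div_eq_div_mul, Nat.div_div_eq_div_mul]
            exact Nat.div_eq_of_lt (by omega)
          have e3 : m / 4096 = 0 := Nat.div_eq_of_lt h3
          rw [pyHex, if_neg h0, hexRev_pos m h0, hexRev_pos _ q1, hexRev_pos _ q2, e1]
          have c1 : m / 16 / 16 = m / 256 := by rw [Nat.div_div_eq_div_mul]
          simp [hexRev, zfill4, c1, e3]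
          decide
        · have q1 : m / 16 ≠ 0 := by
            intro e; have := Nat.lt_of_div_eq_zero (by norm_num) e; omega
          have q2 : m / 16 / 16 ≠ 0 := by
            rw [Nat.div_div_eq_div_mul]
            intro e; have := Nat.lt_of_div_eq_zero (by norm_num) e; omega
          have q3 : m / 16 / 16 / 16 ≠ 0 := by
            rw [Nat.div_div_eq_div_mul, Nat.div_div_eq_div_mul]
            intro e; have := Nat.lt_of_div_eq_zero (by norm_num) e; omega
          have e1 : m / 16 / 16 / 16 / 16 = 0 := by
            rw [Nat.div_div_eq_div_mul, Nat.div_div_eq_div_mul, Nat.div_div_eq_div_mul]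
            exact Nat.div_eq_of_lt (by omega)
          rw [pyHex, if_neg h0, hexRev_pos m h0, hexRev_pos _ q1, hexRev_pos _ q2,
            hexRev_pos _ q3, e1]
          have c1 : m / 16 / 16 = m / 256 := by rw [Nat.div_div_eq_div_mul]
          have c3 : m / 256 / 16 = m / 4096 := by rw [Nat.div_div_eq_div_mul]
          simp [hexRev, zfill4, c1, c3]

-- B's four-iteration loop, fully unfolded
lemma alt_loop (m : Nat) :
    ((PySem.List.pyRange 0 4 1).foldl altStep ([], m)).1.reverse =
      [nib (m / 16 / 16 / 16 % 16), nib (m / 16 / 16 % 16), nib (m / 16 % 16), nib (m % 16)] := by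
  have hr : PySem.List.pyRange 0 4 1 = [0, 1, 2, 3] := by decide
  rw [hr]
  simp [altStep]

-- ===== VERDICT =====
theorem byt_spec : Claim_equal_byt := by
  intro n lon _
  unfold Spec_byt byt byt_alt
  by_cases hneg : n < 0
  · simp [hneg]
  · have hn : 0 ≤ n := by omega
    simp only [hneg, if_false]
    rw [pyRange_eq_descInts]
    obtain ⟨hlen, hmem, hval⟩ := loop_spec 16 [] n hn
    set s := ((descInts 16).foldl bytStep ([], n)).1 with hs
    have hlen16 : s.length = 16 := by simpa using hlen
    have hval' : parse2 s = min n 65535 := by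
      simpa [parse2] using hval
    have hnopad : ¬ s.length < 16 := by omega
    have hany : s.any (fun c => !(c == '0' || c == '1')) = false := by
      rw [List.any_eq_false]
      intro c hc
      rcases hmem c hc with h | h | h
      · simp at h
      · simp [h]
      · simp [h]
    rw [bin_hex]
    simp only [hnopad, if_false, hval']
    rw [if_neg]
    · set m : Nat := (min n 65535).toNat with hm
      have hmlt : m < 65536 := by
        have : min n 65535 ≤ 65535 := min_le_right _ _
        omega
      have hc1 : m / 16 / 16 = m / 256 := by rw [Nat.div_div_eq_div_mul]
      have hc2 : m / 256 / 16 = m / 4096 := by rw [Nat.div_div_eq_div_mul]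
      simp only [Option.getD_some]
      rw [alt_loop, zfill4_pyHex m hmlt, hc1, hc2,
        nib_eq_hexDigit _ (Nat.mod_lt _ (by norm_num)),
        nib_eq_hexDigit _ (Nat.mod_lt _ (by norm_num)),
        nib_eq_hexDigit _ (Nat.mod_lt _ (by norm_num)),
        nib_eq_hexDigit _ (Nat.mod_lt _ (by norm_num))]
    · simp [hlen16]
      intro x hx hx0
      rcases hmem x hx with h | h | h
      · simp at h
      · exact absurd h hx0
      · exact h
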